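-- pv_equiv track=rewrite | github.com/NalvCod/SGE_T5_Nahuel | Ejercicios.py | ej6
-- ===== SOURCE A (Python) =====
-- def ej6(cadena):
--     palabras = cadena.split(' ')
--
--     palabracorta = palabras[0]
--     palabralarga = palabras[0]
--
--     for palabra in palabras:
--         if len(palabra) < len(palabracorta):
--             palabracorta = palabra
--         if len(palabra) > len(palabralarga):
--             palabralarga = palabra
--
--     return palabracorta, palabralarga
-- ===== SOURCE B (Python) =====
-- def ej6(cadena):
--     # Index the first word of each length in a dict, then reduce over the integer keys.
--     primera = {}
--     for palabra in cadena.split(' '):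
--         if len(palabra) not in primera:
--             primera[len(palabra)] = palabra
--     return primera[min(primera)], primera[max(primera)]
-- ===== Notes on version B (the rewrite author's own statement) =====
-- stated objective: alternative
-- what changed: Replaces A's two-accumulator scan comparing words with a length-indexed dict (first word of each length) built in one pass, followed by integer min/max over the dict keys and two lookups.
import Mathlib
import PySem

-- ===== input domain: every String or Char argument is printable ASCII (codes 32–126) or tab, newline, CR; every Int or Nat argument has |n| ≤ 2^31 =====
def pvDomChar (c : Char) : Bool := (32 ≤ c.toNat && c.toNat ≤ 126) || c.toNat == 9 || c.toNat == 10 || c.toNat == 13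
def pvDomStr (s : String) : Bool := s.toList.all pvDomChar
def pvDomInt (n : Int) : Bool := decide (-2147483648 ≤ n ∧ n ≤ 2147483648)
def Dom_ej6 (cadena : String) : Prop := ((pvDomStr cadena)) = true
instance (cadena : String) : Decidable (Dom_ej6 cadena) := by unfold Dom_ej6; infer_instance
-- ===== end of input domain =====

-- B replaces A's two-accumulator word-comparison scan with a length-indexed dict (first word of
-- each length) built in one pass, then integer min/max over the keys and two lookups back.

-- ===== PORT A =====
-- literal transliteration: split on ' ', init both accumulators to palabras[0], one pass
-- with two independent strict-comparison updates.  split(' ') never yields an empty list,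
-- so the headD defaults are unreachable.
def ej6 (cadena : String) : String × String :=
  let palabras := (PySem.Str.split? cadena " ").getD []
  let palabracorta := palabras.headD ""
  let palabralarga := palabras.headD ""
  palabras.foldl
    (fun (st : String × String) palabra =>
      let st := if PySem.Str.len palabra < PySem.Str.len st.1 then (palabra, st.2) else st
      if PySem.Str.len st.2 < PySem.Str.len palabra then (st.1, palabra) else st)
    (palabracorta, palabralarga)

-- ===== PORT B =====
-- literal transliteration of Source B: build the dict 'primera' mapping each word length to the
-- first word of that length, then min/max over the integer keys and index back.  split(' ')
-- is nonempty, so the dict is nonempty: the getD defaults (min/max of the key list, primera[k])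
-- are unreachable (Python would raise only on an empty dict / missing key, which cannot occur).
def ej6_alt (cadena : String) : String × String :=
  let primera : PySem.Dict Int String :=
    ((PySem.Str.split? cadena " ").getD []).foldl
      (fun d palabra =>
        if d.contains (PySem.Str.len palabra) then d
        else d.insert (PySem.Str.len palabra) palabra)
      PySem.Dict.empty
  let lmin := (PySem.List.min? primera.keys (fun k => k)).getD 0
  let lmax := (PySem.List.max? primera.keys (fun k => k)).getD 0
  ((primera.get? lmin).getD "", (primera.get? lmax).getD "")

-- ===== PRECONDITION & SPEC =====
def Spec_ej6 (cadena : String) (out : String × String) : Prop := out = ej6_alt cadena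
instance (cadena : String) (out : String × String) : Decidable (Spec_ej6 cadena out) := by unfold Spec_ej6; infer_instance

-- ===== CLAIM (what is proved, stated in full; the proofs are below) =====
def Claim_equal_ej6 : Prop := ∀ (cadena : String), Dom_ej6 cadena → Spec_ej6 cadena (ej6 cadena)

-- ===== LEMMAS AND PROOFS =====

-- abbreviations for the three loop bodies (proof-side only)
def pvStep (d : PySem.Dict Int String) (x : String) : PySem.Dict Int String :=
  if d.contains (PySem.Str.len x) then d else d.insert (PySem.Str.len x) x

def pvMin (m x : String) : String :=
  if PySem.Str.len x < PySem.Str.len m then x else m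

def pvMax (m x : String) : String :=
  if PySem.Str.len m < PySem.Str.len x then x else m

-- the invariant tying B's dict to A's two accumulators
def pvInv (d : PySem.Dict Int String) (c l : String) : Prop :=
  (∀ k ∈ d.keys, PySem.Str.len c ≤ k ∧ k ≤ PySem.Str.len l) ∧
  PySem.List.min? d.keys (fun k => k) = some (PySem.Str.len c) ∧
  PySem.List.max? d.keys (fun k => k) = some (PySem.Str.len l) ∧
  d.get? (PySem.Str.len c) = some c ∧
  d.get? (PySem.Str.len l) = some l

theorem pv_min_append (t : List Int) (a b : Int) :
    PySem.List.min? (a :: (t ++ [b])) (fun k => k) = some (min (t.foldl min a) b) := by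
  rw [PySem.List.min?_id_cons, List.foldl_append]; rfl

theorem pv_max_append (t : List Int) (a b : Int) :
    PySem.List.max? (a :: (t ++ [b])) (fun k => k) = some (max (t.foldl max a) b) := by
  rw [PySem.List.max?_id_cons, List.foldl_append]; rfl

theorem pv_inv_step (d : PySem.Dict Int String) (c l x : String) (h : pvInv d c l) :
    pvInv (pvStep d x) (pvMin c x) (pvMax l x) := by
  obtain ⟨hbnd, hmin, hmax, hgc, hgl⟩ := h
  by_cases hc : d.contains (PySem.Str.len x) = true
  · -- length already present: neither side changes anything
    have hmem : PySem.Str.len x ∈ d.keys := (PySem.Dict.contains_iff_mem_keys d _).mp hc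
    have hb := hbnd _ hmem
    have hcmin : pvMin c x = c := by unfold pvMin; rw [if_neg (by omega)]
    have hcmax : pvMax l x = l := by unfold pvMax; rw [if_neg (by omega)]
    unfold pvStep
    rw [if_pos hc, hcmin, hcmax]
    exact ⟨hbnd, hmin, hmax, hgc, hgl⟩
  · -- new length: the key list gains len x at the end
    have hc' : d.contains (PySem.Str.len x) = false := by
      cases hhh : d.contains (PySem.Str.len x) <;> simp_all
    have hkeys : (d.insert (PySem.Str.len x) x).keys = d.keys ++ [PySem.Str.len x] :=
      PySem.Dict.keys_insert_of_not_contains d x hc'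
    -- the key list is nonempty: min? d.keys = some _ forces it
    obtain ⟨k0, rest, hk⟩ : ∃ k0 rest, d.keys = k0 :: rest := by
      cases hdk : d.keys with
      | nil => rw [hdk] at hmin; simp [PySem.List.min?] at hmin
      | cons k0 rest => exact ⟨k0, rest, rfl⟩
    have hfmin : rest.foldl min k0 = PySem.Str.len c := by
      rw [hk, PySem.List.min?_id_cons] at hmin; exact Option.some.inj hmin
    have hfmax : rest.foldl max k0 = PySem.Str.len l := by
      rw [hk, PySem.List.max?_id_cons] at hmax; exact Option.some.inj hmax
    have hxne_c : PySem.Str.len x ≠ PySem.Str.len c := by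
      intro he
      exact hc ((PySem.Dict.contains_iff_mem_keys d _).mpr
        (by rw [he]; exact PySem.List.min?_mem hmin))
    have hxne_l : PySem.Str.len x ≠ PySem.Str.len l := by
      intro he
      exact hc ((PySem.Dict.contains_iff_mem_keys d _).mpr
        (by rw [he]; exact PySem.List.max?_mem hmax))
    constructor
    · -- bounds
      intro k hkmem
      rw [pvStep, if_neg (by simpa using hc'), hkeys] at hkmem
      rcases List.mem_append.mp hkmem with hold | hnew
      · have := hbnd _ hold
        unfold pvMin pvMax; split_ifs <;> omega
      · have : k = PySem.Str.len x := by simpa using hnew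
        subst this
        unfold pvMin pvMax; split_ifs <;> omega
    refine ⟨?_, ?_, ?_, ?_⟩
    · -- min?
      rw [pvStep, if_neg (by simpa using hc'), hkeys, hk, List.cons_append,
        pv_min_append, hfmin]
      unfold pvMin; split_ifs <;> simp only [Option.some.injEq] <;> omega
    · -- max?
      rw [pvStep, if_neg (by simpa using hc'), hkeys, hk, List.cons_append,
        pv_max_append, hfmax]
      unfold pvMax; split_ifs <;> simp only [Option.some.injEq] <;> omega
    · -- lookup of the short word
      rw [pvStep, if_neg (by simpa using hc')]
      unfold pvMin; split_ifs with hlt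
      · exact PySem.Dict.get?_insert_self d _ _
      · rw [PySem.Dict.get?_insert_of_ne d x (Ne.symm hxne_c)]; exact hgc
    · -- lookup of the long word
      rw [pvStep, if_neg (by simpa using hc')]
      unfold pvMax; split_ifs with hlt
      · exact PySem.Dict.get?_insert_self d _ _
      · rw [PySem.Dict.get?_insert_of_ne d x (Ne.symm hxne_l)]; exact hgl

theorem pv_inv_foldl (t : List String) (d : PySem.Dict Int String) (c l : String)
    (h : pvInv d c l) :
    pvInv (t.foldl pvStep d) (t.foldl pvMin c) (t.foldl pvMax l) := by
  induction t generalizing d c l with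
  | nil => exact h
  | cons x t ih => exact ih _ _ _ (pv_inv_step d c l x h)

theorem pv_inv_init (w : String) :
    pvInv (pvStep PySem.Dict.empty w) w w := by
  have h : pvStep PySem.Dict.empty w = PySem.Dict.empty.insert (PySem.Str.len w) w := by
    simp [pvStep, PySem.Dict.contains_empty]
  rw [h]
  refine ⟨?_, ?_, ?_, ?_, ?_⟩ <;>
    simp [PySem.Dict.keys_insert_of_not_contains _ _ (PySem.Dict.contains_empty _),
      PySem.Dict.keys_empty, PySem.List.min?, PySem.List.max?,
      PySem.Dict.get?_insert_self]

-- A's paired fold splits into the two independent running folds.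
theorem pv_pairfold (t : List String) (c l : String) :
    List.foldl
      (fun (st : String × String) palabra =>
        let st := if PySem.Str.len palabra < PySem.Str.len st.1 then (palabra, st.2) else st
        if PySem.Str.len st.2 < PySem.Str.len palabra then (st.1, palabra) else st)
      (c, l) t
    = (t.foldl pvMin c, t.foldl pvMax l) := by
  induction t generalizing c l with
  | nil => rfl
  | cons y t ih =>
    simp only [List.foldl_cons, pvMin, pvMax]
    split_ifs <;> exact ih _ _

-- the core equivalence over an arbitrary word list (covers the unreachable [] case too)
theorem pv_core (ws : List String) :
    List.foldl
      (fun (st : String × String) palabra =>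
        let st := if PySem.Str.len palabra < PySem.Str.len st.1 then (palabra, st.2) else st
        if PySem.Str.len st.2 < PySem.Str.len palabra then (st.1, palabra) else st)
      (ws.headD "", ws.headD "") ws
    = (let primera := ws.foldl pvStep PySem.Dict.empty
       let lmin := (PySem.List.min? primera.keys (fun k => k)).getD 0
       let lmax := (PySem.List.max? primera.keys (fun k => k)).getD 0
       ((primera.get? lmin).getD "", (primera.get? lmax).getD "")) := by
  cases ws with
  | nil => rfl
  | cons w t =>
    have hinv := pv_inv_foldl t _ w w (pv_inv_init w)
    obtain ⟨_, hmin, hmax, hgc, hgl⟩ := hinv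
    have hA : List.foldl
        (fun (st : String × String) palabra =>
          let st := if PySem.Str.len palabra < PySem.Str.len st.1 then (palabra, st.2) else st
          if PySem.Str.len st.2 < PySem.Str.len palabra then (st.1, palabra) else st)
        ((w :: t).headD "", (w :: t).headD "") (w :: t)
        = (t.foldl pvMin w, t.foldl pvMax w) := by
      simp only [List.headD_cons, List.foldl_cons, lt_self_iff_false, if_false]
      exact pv_pairfold t w w
    rw [hA]
    have hfold : (w :: t).foldl pvStep PySem.Dict.empty
        = t.foldl pvStep (pvStep PySem.Dict.empty w) := rfl
    simp only [hfold, hmin, hmax, Option.getD_some, hgc, hgl]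

-- ===== VERDICT (by name: the statement is the Claim_ definition above) =====
theorem ej6_spec : Claim_equal_ej6 := by
  intro cadena _
  unfold Spec_ej6 ej6 ej6_alt
  have h := pv_core ((PySem.Str.split? cadena " ").getD [])
  simpa [pvStep, pvMin, pvMax] using h
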